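-- pv_equiv track=rewrite | github.com/Rhaegal222/Unical | Primo Anno/Fondamenti di Programmazione 1/EPLPAPS/Esercizi PDF/esercizio2v2.py | ricorsiva
-- ===== SOURCE A (Python) =====
-- def ricorsiva(numeri, i, pari, dispari):
--     if i >= len(numeri)-1:
--         return True
--     somma = numeri[i] + numeri[i+1]
--     if somma % 2 == 0 and dispari:
--         return False
--     elif somma % 2 != 0 and pari:
--         return False
--     return ricorsiva(numeri, i+1, not(pari), not(dispari))
-- ===== SOURCE B (Python) =====
-- def ricorsiva(numeri, i, pari, dispari):
--     n = len(numeri)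
--     for j in range(i, n - 1):
--         somma = numeri[j] + numeri[j + 1]
--         even = somma % 2 == 0
--         if (j - i) % 2 == 0:
--             p, d = pari, dispari
--         else:
--             p, d = not pari, not dispari
--         if (even and d) or (not even and p):
--             return False
--     return True
-- ===== Notes on version B (the rewrite author's own statement) =====
-- stated objective: simpler
-- what changed: Replaces the tail recursion with its toggling flag pair by a single for-loop over range(i, n-1) that computes the expected flag at step j arithmetically from (j-i) % 2, removing the recursion and the flag mutation.
import Mathlib
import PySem

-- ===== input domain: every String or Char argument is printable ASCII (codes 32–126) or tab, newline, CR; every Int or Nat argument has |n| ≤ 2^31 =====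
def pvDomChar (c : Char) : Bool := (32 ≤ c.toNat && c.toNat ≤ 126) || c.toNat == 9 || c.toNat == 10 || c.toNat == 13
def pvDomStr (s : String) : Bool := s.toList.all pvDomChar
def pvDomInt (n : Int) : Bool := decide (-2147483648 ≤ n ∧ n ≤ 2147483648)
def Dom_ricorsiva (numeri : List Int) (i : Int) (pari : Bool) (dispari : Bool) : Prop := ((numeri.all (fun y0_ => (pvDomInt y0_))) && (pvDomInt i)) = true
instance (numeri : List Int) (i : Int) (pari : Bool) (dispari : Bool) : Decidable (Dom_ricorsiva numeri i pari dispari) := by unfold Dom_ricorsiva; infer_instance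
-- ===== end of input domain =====

-- B replaces A's tail recursion (with a toggling flag pair) by one loop over range(i, n-1)
-- that computes the expected flag at step j from (j-i) % 2; objective: simpler.

-- ===== PORT A =====
-- literal transliteration of A's recursion; the 'none' indexing branch is where Python
-- raises IndexError (excluded by Pre_ricorsiva)
def ricorsiva (numeri : List Int) (i : Int) (pari : Bool) (dispari : Bool) : Bool :=
  if _h : (numeri.length : Int) - 1 ≤ i then true
  else
    match PySem.List.pyGet? numeri i, PySem.List.pyGet? numeri (i + 1) with
    | some a, some b =>
      let somma := a + b
      if PySem.Int.mod somma 2 == 0 && dispari then false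
      else if PySem.Int.mod somma 2 != 0 && pari then false
      else ricorsiva numeri (i + 1) (!pari) (!dispari)
    | _, _ => true
  termination_by ((numeri.length : Int) - 1 - i).toNat
  decreasing_by omega

-- ===== PORT B =====
-- transliteration of Source B's for-loop: .all over range(i, n-1), flag from (j-i) % 2
def ricorsiva_alt (numeri : List Int) (i : Int) (pari : Bool) (dispari : Bool) : Bool :=
  (PySem.List.pyRange i ((numeri.length : Int) - 1) 1).all (fun j =>
    let somma := PySem.List.pyGetD numeri j 0 + PySem.List.pyGetD numeri (j + 1) 0
    let even := PySem.Int.mod somma 2 == 0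
    let p := if PySem.Int.mod (j - i) 2 == 0 then pari else !pari
    let d := if PySem.Int.mod (j - i) 2 == 0 then dispari else !dispari
    !((even && d) || (!even && p)))

-- ===== PRECONDITION & SPEC =====
-- Pre_ excludes exactly the inputs where Python A raises IndexError: a start index below
-- -len(numeri) that is still left of len-1 (B raises there too).
def Pre_ricorsiva (numeri : List Int) (i : Int) (pari : Bool) (dispari : Bool) : Prop :=
  (numeri.length : Int) - 1 ≤ i ∨ -(numeri.length : Int) ≤ i
instance (numeri : List Int) (i : Int) (pari : Bool) (dispari : Bool) : Decidable (Pre_ricorsiva numeri i pari dispari) := by unfold Pre_ricorsiva; infer_instance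

def pvWitness_ricorsiva : List Int × Int × Bool × Bool := ([1, 2, 3, 4], 0, true, false)

def Spec_ricorsiva (numeri : List Int) (i : Int) (pari : Bool) (dispari : Bool) (out : Bool) : Prop := out = ricorsiva_alt numeri i pari dispari
instance (numeri : List Int) (i : Int) (pari : Bool) (dispari : Bool) (out : Bool) : Decidable (Spec_ricorsiva numeri i pari dispari out) := by unfold Spec_ricorsiva; infer_instance

-- ===== CLAIM (what is proved, stated in full; the proofs are below) =====
def Claim_equal_ricorsiva : Prop := ∀ (numeri : List Int) (i : Int) (pari : Bool) (dispari : Bool), Dom_ricorsiva numeri i pari dispari → Pre_ricorsiva numeri i pari dispari → Spec_ricorsiva numeri i pari dispari (ricorsiva numeri i pari dispari)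

-- ===== LEMMAS AND PROOFS =====

-- an in-range python index yields 'some', with the value pyGetD reads
lemma pyGet?_some_of_inRange (xs : List Int) (i : Int) (h : PySem.Raise.InRange xs.length i) :
    PySem.List.pyGet? xs i = some (PySem.List.pyGetD xs i 0) := by
  have h' : -(xs.length : Int) ≤ i ∧ i < xs.length := by
    simpa [PySem.Raise.InRange] using h
  simp only [PySem.List.pyGetD, PySem.List.pyGet?, PySem.List.pyIdx?]
  split_ifs with h1 h2 h3
  · simp [List.getElem?_eq_getElem (show i.toNat < xs.length by omega)]
  · omega
  · simp [List.getElem?_eq_getElem (show xs.length - (-i).toNat < xs.length by omega)]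
  · omega

-- the alt's per-step flag for start i+1 with flipped flags equals the one for start i
lemma alt_shift (numeri : List Int) (i : Int) (pari dispari : Bool) :
    ricorsiva_alt numeri (i + 1) (!pari) (!dispari) =
    (PySem.List.pyRange (i + 1) ((numeri.length : Int) - 1) 1).all (fun j =>
      let somma := PySem.List.pyGetD numeri j 0 + PySem.List.pyGetD numeri (j + 1) 0
      let even := PySem.Int.mod somma 2 == 0
      let p := if PySem.Int.mod (j - i) 2 == 0 then pari else !pari
      let d := if PySem.Int.mod (j - i) 2 == 0 then dispari else !dispari
      !((even && d) || (!even && p))) := by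
  unfold ricorsiva_alt
  refine List.all_congr rfl (fun j => ?_)
  by_cases h : (2:Int) ∣ (j - i)
  · have h' : ¬ (2:Int) ∣ (j - (i + 1)) := by omega
    simp [h, h']
  · have h' : (2:Int) ∣ (j - (i + 1)) := by omega
    simp [h, h']

lemma main_lemma (k : Nat) : ∀ (numeri : List Int) (i : Int) (pari dispari : Bool),
    ((numeri.length : Int) - 1 - i).toNat = k →
    Pre_ricorsiva numeri i pari dispari →
    ricorsiva numeri i pari dispari = ricorsiva_alt numeri i pari dispari := by
  induction k with
  | zero =>
    intro numeri i pari dispari hk _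
    have hge : (numeri.length : Int) - 1 ≤ i := by omega
    rw [ricorsiva, ricorsiva_alt, PySem.List.pyRange_one_eq_nil (by omega)]
    simp [hge]
  | succ k ih =>
    intro numeri i pari dispari hk hpre
    have hlt : i < (numeri.length : Int) - 1 := by omega
    have hi : -(numeri.length : Int) ≤ i := by
      rcases hpre with h | h
      · omega
      · exact h
    have ha := pyGet?_some_of_inRange numeri i (by unfold PySem.Raise.InRange; omega)
    have hb := pyGet?_some_of_inRange numeri (i + 1) (by unfold PySem.Raise.InRange; omega)
    have hrec : ricorsiva numeri (i + 1) (!pari) (!dispari) =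
        ricorsiva_alt numeri (i + 1) (!pari) (!dispari) :=
      ih numeri (i + 1) (!pari) (!dispari) (by omega) (Or.inr (by omega))
    rw [ricorsiva]
    simp only [ha, hb, dif_neg (show ¬ ((numeri.length : Int) - 1 ≤ i) by omega)]
    rw [ricorsiva_alt, PySem.List.pyRange_one_cons hlt, List.all_cons, ← alt_shift, hrec]
    have hzero : (PySem.Int.mod (i - i) 2 == 0) = true := by
      rw [sub_self]; decide
    simp only [hzero, if_true]
    by_cases hd : (2:Int) ∣ (PySem.List.pyGetD numeri i 0 + PySem.List.pyGetD numeri (i + 1) 0) <;>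
      cases pari <;> cases dispari <;>
      simp [hd, bne]

-- ===== VERDICT (by name: the statement is the Claim_ definition above) =====
theorem ricorsiva_spec : Claim_equal_ricorsiva := by
  intro numeri i pari dispari _ hpre
  unfold Spec_ricorsiva
  exact main_lemma _ numeri i pari dispari rfl hpre
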